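-- pv_equiv track=rewrite | github.com/ejkaplan/AxidrawPython | noisefields/noise_lines.py | occlude
-- ===== SOURCE A (Python) =====
-- def occlude(paths, lookahead=None):
--     if lookahead is None:
--         lookahead = len(paths)
--     out = []
--     for i in range(len(paths) - 1):
--         path = []
--         for j in range(len(paths[i])):
--             path_point = paths[i][j]
--             point_ok = True
--             for other in range(i + 1, min(lookahead + i + 1, len(paths))):
--                 below = paths[other][j]
--                 if path_point[1] > below[1]:
--                     point_ok = False
--                     break
--             if point_ok:
--                 path.append(path_point)
--             else:
--                 if len(path) > 1:
--                     out.append(path)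
--                 path = []
--         if len(path) > 1:
--             out.append(path)
--     out.append(paths[-1])
--     return out
-- ===== SOURCE B (Python) =====
-- def occlude(paths, lookahead=None):
--     # Per column: next-smaller-index via pointer jumping (amortized O(1) per cell),
--     # so each point is tested against one precomputed index instead of rescanning
--     # up to `lookahead` following paths.
--     n = len(paths)
--     la = n if lookahead is None else lookahead
--     PAD = 1 << 62
--     m = 0
--     for p in paths:
--         m = max(m, len(p))
--     nss = []
--     for j in range(m):
--         ys = [p[j][1] if j < len(p) else PAD for p in paths]
--         ns = [n] * n
--         for i in range(n - 1, -1, -1):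
--             k = i + 1
--             while k < n and ys[k] >= ys[i]:
--                 k = ns[k]
--             ns[i] = k
--         nss.append(ns)
--     out = []
--     for i in range(n - 1):
--         row = paths[i]
--         keep = [nss[j][i] >= min(la + i + 1, n) for j in range(len(row))]
--         idx = 0
--         while idx < len(row):
--             if not keep[idx]:
--                 idx += 1
--                 continue
--             start = idx
--             while idx < len(row) and keep[idx]:
--                 idx += 1
--             if idx - start > 1:
--                 out.append(row[start:idx])
--     out.append(paths[-1])
--     return out
-- ===== Notes on version B (the rewrite author's own statement) =====
-- stated objective: faster
-- what changed: Per column, B precomputes the next strictly-lower index for every path via pointer-jumping (next-smaller-element), so each point is occlusion-tested by one index comparison instead of rescanning up to `lookahead` following paths; runs are then split per row from a boolean mask.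
import Mathlib
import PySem

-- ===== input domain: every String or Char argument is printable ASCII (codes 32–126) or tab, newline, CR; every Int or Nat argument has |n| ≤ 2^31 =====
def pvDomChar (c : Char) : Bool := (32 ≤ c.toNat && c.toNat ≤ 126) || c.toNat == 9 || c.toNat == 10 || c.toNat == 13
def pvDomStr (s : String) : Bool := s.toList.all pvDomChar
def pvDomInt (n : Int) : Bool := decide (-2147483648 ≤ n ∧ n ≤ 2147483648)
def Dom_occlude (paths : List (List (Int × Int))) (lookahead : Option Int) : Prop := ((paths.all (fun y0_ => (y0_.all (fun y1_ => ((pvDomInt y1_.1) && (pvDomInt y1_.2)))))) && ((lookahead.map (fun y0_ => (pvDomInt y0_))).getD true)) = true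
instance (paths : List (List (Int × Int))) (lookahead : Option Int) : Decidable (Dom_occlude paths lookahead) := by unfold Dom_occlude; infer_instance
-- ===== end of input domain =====

-- B replaces A's inner rescan of up to `lookahead` following paths by a per-column
-- next-smaller-index table (pointer jumping), then splits each row into kept runs.

-- shared defaulting of the `lookahead=None` parameter (Python: `if lookahead is None: lookahead = len(paths)`)
def pvLa (lookahead : Option Int) (n : Nat) : Int :=
  match lookahead with | none => (n : Int) | some v => v

-- ===== PORT A =====
-- the 'for other in range(i+1, …): … break' loop of A, as structural recursion over the range list
def pvOkLoop (py : Int) (paths : List (List (Int × Int))) (j : Int) : List Int → Bool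
  | [] => true
  | k :: rest =>
    let below := (PySem.List.pyGet? ((PySem.List.pyGet? paths k).getD []) j).getD (0, 0)
    if below.2 < py then false else pvOkLoop py paths j rest

def occlude (paths : List (List (Int × Int))) (lookahead : Option Int) : List (List (Int × Int)) :=
  let la : Int := pvLa lookahead paths.length
  let n : Int := (paths.length : Int)
  let out := (PySem.List.pyRange 0 (n - 1) 1).foldl (fun out i =>
    let row := (PySem.List.pyGet? paths i).getD []
    let st := (PySem.List.pyRange 0 (row.length : Int) 1).foldl
      (fun (st : List (Int × Int) × List (List (Int × Int))) j =>
        let pp := (PySem.List.pyGet? row j).getD (0, 0)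
        let ok := pvOkLoop pp.2 paths j (PySem.List.pyRange (i + 1) (min (la + i + 1) n) 1)
        if ok then (st.1 ++ [pp], st.2)
        else ([], if st.1.length > 1 then st.2 ++ [st.1] else st.2))
      ([], out)
    if st.1.length > 1 then st.2 ++ [st.1] else st.2) []
  out ++ [(PySem.List.pyGet? paths (-1)).getD []]

-- ===== PORT B =====
-- column j of `paths` as y-values, absent cells padded (pad value is never consulted on admitted inputs)
def pvYs (paths : List (List (Int × Int))) (j : Nat) : List Int :=
  paths.map (fun p => if j < p.length then (p.getD j (0, 0)).2 else (2 : Int) ^ 62)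

-- the 'while k < n and ys[k] >= ys[i]: k = ns[k]' loop; fuel n always suffices (k strictly increases)
def pvJump (n : Nat) (ys : Array Int) (ns : Array Nat) (yi : Int) : Nat → Nat → Nat
  | 0, k => k
  | fuel + 1, k =>
    if k < n && decide (yi ≤ ys.getD k 0) then pvJump n ys ns yi fuel (ns.getD k n) else k

-- 'ns = [n]*n; for i in range(n-1, -1, -1): … ns[i] = k'
def pvBuildNs (n : Nat) (ys : Array Int) : Array Nat :=
  (List.range n).reverse.foldl
    (fun ns i => ns.setIfInBounds i (pvJump n ys ns (ys.getD i 0) n (i + 1)))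
    (Array.replicate n n)

-- the idx/while scan over (point, keep) pairs emitting maximal kept runs of length > 1
def pvRuns : List ((Int × Int) × Bool) → List (List (Int × Int))
  | [] => []
  | (pt, b) :: rest =>
    if hb : b = true then
      let run := (((pt, b) :: rest).takeWhile (fun q => q.2)).map (fun q => q.1)
      let rest' := ((pt, b) :: rest).dropWhile (fun q => q.2)
      if run.length > 1 then run :: pvRuns rest' else pvRuns rest'
    else pvRuns rest
termination_by l => l.length
decreasing_by
  · simp only [List.dropWhile_cons, hb, if_true]
    exact Nat.lt_succ_of_le (List.length_dropWhile_le _ _)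
  · simp only [List.dropWhile_cons, hb, if_true]
    exact Nat.lt_succ_of_le (List.length_dropWhile_le _ _)
  · simp

def occlude_alt (paths : List (List (Int × Int))) (lookahead : Option Int) : List (List (Int × Int)) :=
  let n := paths.length
  let la : Int := pvLa lookahead n
  let m := paths.foldl (fun a p => max a p.length) 0
  let nss := (List.range m).map (fun j => pvBuildNs n (Array.mk (pvYs paths j)))
  let out := (List.range (n - 1)).foldl (fun out i =>
      let row := paths.getD i []
      let e : Int := min (la + (i : Int) + 1) (n : Int)
      let keep := (List.range row.length).map
        (fun j => decide (e ≤ (((nss.getD j #[]).getD i n : Nat) : Int)))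
      out ++ pvRuns (row.zip keep)) []
  out ++ [paths.getD (n - 1) []]

-- ===== PRECONDITION & SPEC =====
-- Pre_ is exactly where A returns: A raises IndexError on empty `paths` (paths[-1]) and,
-- when the effective lookahead is ≥ 1, whenever some path is longer than its successor
-- (paths[other][j] is then indexed out of range).
def Pre_occlude (paths : List (List (Int × Int))) (lookahead : Option Int) : Prop :=
  paths ≠ [] ∧
    (pvLa lookahead paths.length ≤ 0 ∨
      List.IsChain (fun p q => p.length ≤ q.length) paths)
instance (paths : List (List (Int × Int))) (lookahead : Option Int) : Decidable (Pre_occlude paths lookahead) := by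
  unfold Pre_occlude; infer_instance

def pvWitness_occlude : (List (List (Int × Int))) × Option Int :=
  ([[(0, 2), (1, 0)], [(0, 1), (1, 1)]], none)

def Spec_occlude (paths : List (List (Int × Int))) (lookahead : Option Int) (out : List (List (Int × Int))) : Prop := out = occlude_alt paths lookahead
instance (paths : List (List (Int × Int))) (lookahead : Option Int) (out : List (List (Int × Int))) : Decidable (Spec_occlude paths lookahead out) := by unfold Spec_occlude; infer_instance

-- ===== CLAIM (what is proved, stated in full; the proofs are below) =====
def Claim_equal_occlude : Prop := ∀ (paths : List (List (Int × Int))) (lookahead : Option Int), Dom_occlude paths lookahead → Pre_occlude paths lookahead → Spec_occlude paths lookahead (occlude paths lookahead)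

-- ===== LEMMAS AND PROOFS =====

-- y-value of point j of path k (total read used throughout the proofs)
def pvY (paths : List (List (Int × Int))) (k j : Nat) : Int :=
  ((paths.getD k []).getD j (0, 0)).2

-- what pvBuildNs computes at index i: the first t > i whose padded y is strictly lower (n if none)
def NsSpec (n : Nat) (ys : Array Int) (i t : Nat) : Prop :=
  i < t ∧ t ≤ n ∧ (t < n → ys.getD t 0 < ys.getD i 0) ∧
    ∀ s, i < s → s < t → ys.getD i 0 ≤ ys.getD s 0

lemma pvOkLoop_eq_all (py : Int) (paths : List (List (Int × Int))) (j : Int) (ks : List Int) :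
    pvOkLoop py paths j ks =
      ks.all (fun k => decide (py ≤ ((PySem.List.pyGet? ((PySem.List.pyGet? paths k).getD []) j).getD (0, 0)).2)) := by
  induction ks with
  | nil => rfl
  | cons k rest ih =>
    simp only [pvOkLoop, List.all_cons, ih]
    by_cases h : ((PySem.List.pyGet? ((PySem.List.pyGet? paths k).getD []) j).getD (0, 0)).2 < py
    · simp [h, not_le.mpr h]
    · simp [h, not_lt.mp h]

lemma pvJump_spec (n : Nat) (ys : Array Int) (ns : Array Nat) (yi : Int) :
    ∀ fuel k, (∀ t, k ≤ t → t < n → NsSpec n ys t (ns.getD t n)) → k ≤ n → n - k < fuel →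
      k ≤ pvJump n ys ns yi fuel k ∧ pvJump n ys ns yi fuel k ≤ n ∧
      (pvJump n ys ns yi fuel k < n → ys.getD (pvJump n ys ns yi fuel k) 0 < yi) ∧
      (∀ s, k ≤ s → s < pvJump n ys ns yi fuel k → yi ≤ ys.getD s 0) := by
  intro fuel
  induction fuel with
  | zero => intro k _ _ h; omega
  | succ f ih =>
    intro k hns hk hfuel
    simp only [pvJump]
    cases hc : (k < n && decide (yi ≤ ys.getD k 0)) with
    | true =>
      simp only [if_true]
      have hkn : k < n := by simpa using (Bool.and_elim_left hc)
      have hyk : yi ≤ ys.getD k 0 := by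
        have := Bool.and_elim_right hc; simpa using this
      obtain ⟨h1, h2, h3, h4⟩ := hns k le_rfl hkn
      have ih' := ih (ns.getD k n)
        (fun t ht htn => hns t (by omega) htn) h2 (by omega)
      obtain ⟨i1, i2, i3, i4⟩ := ih'
      refine ⟨by omega, i2, i3, ?_⟩
      intro s hs1 hs2
      rcases Nat.lt_or_ge s (ns.getD k n) with hlt | hge
      · rcases Nat.eq_or_lt_of_le hs1 with rfl | hgt
        · exact hyk
        · exact le_trans hyk (h4 s hgt hlt)
      · exact i4 s hge hs2
    | false =>
      simp only [Bool.false_eq_true, if_false]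
      refine ⟨le_rfl, ?_, ?_, ?_⟩
      · rcases Nat.lt_or_ge k n with h | h
        · omega
        · omega
      · intro hkn
        have : ¬ (yi ≤ ys.getD k 0) := by
          intro hle
          have : (decide (k < n) && decide (yi ≤ ys.getD k 0)) = true := by
            simp only [Bool.and_eq_true, decide_eq_true_eq]; exact ⟨hkn, hle⟩
          rw [hc] at this
          exact Bool.false_ne_true this
        omega
      · intro s h1 h2; omega

lemma pvBuildNs_go (n : Nat) (ys : Array Int) :
    ∀ (l : Nat) (a : Array Nat), l ≤ n → a.size = n →
      (∀ t, l ≤ t → t < n → NsSpec n ys t (a.getD t n)) →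
      ∀ t, t < n →
        NsSpec n ys t
          (((List.range l).reverse.foldl
            (fun ns i => ns.setIfInBounds i (pvJump n ys ns (ys.getD i 0) n (i + 1))) a).getD t n) := by
  intro l
  induction l with
  | zero =>
    intro a _ _ ha t ht
    simpa using ha t (Nat.zero_le t) ht
  | succ l ih =>
    intro a hl hsz ha t ht
    rw [List.range_succ, List.reverse_append, List.reverse_singleton, List.singleton_append,
      List.foldl_cons]
    have hln : l < n := by omega
    set v := pvJump n ys a (ys.getD l 0) n (l + 1) with hv
    have hj := pvJump_spec n ys a (ys.getD l 0) n (l + 1)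
      (fun t ht1 ht2 => ha t (by omega) ht2) (by omega) (by omega)
    have hgd : ∀ t, (a.setIfInBounds l v).getD t n = if t = l then v else a.getD t n := by
      intro t
      by_cases he : t = l
      · subst he
        simp [Array.getD, hsz, hln, Array.getElem_setIfInBounds_self]
      · by_cases htn : t < n
        · simp [Array.getD, Array.size_setIfInBounds, hsz, htn, he,
            Array.getElem_setIfInBounds_ne (by omega : t < a.size) (by omega : l ≠ t)]
        · simp [Array.getD, Array.size_setIfInBounds, hsz, htn, he]
    refine ih (a.setIfInBounds l v) (by omega) (by simpa [Array.size_setIfInBounds] using hsz) ?_ t ht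
    intro t ht1 ht2
    rw [hgd]
    by_cases he : t = l
    · subst he
      rw [if_pos rfl]
      obtain ⟨j1, j2, j3, j4⟩ := hj
      exact ⟨by omega, j2, j3, fun s hs1 hs2 => j4 s (by omega) hs2⟩
    · rw [if_neg he]
      exact ha t (by omega) ht2

lemma pvBuildNs_spec (n : Nat) (ys : Array Int) :
    ∀ t, t < n → NsSpec n ys t ((pvBuildNs n ys).getD t n) := by
  intro t ht
  exact pvBuildNs_go n ys n (Array.replicate n n) le_rfl (by simp)
    (fun t ht1 ht2 => absurd ht2 (by omega)) t ht

-- A's row fold with flush, expressed via an explicit run accumulator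
def pvRunsAux (cur : List (Int × Int)) : List ((Int × Int) × Bool) → List (List (Int × Int))
  | [] => if cur.length > 1 then [cur] else []
  | (pt, b) :: rest =>
    if b then pvRunsAux (cur ++ [pt]) rest
    else (if cur.length > 1 then [cur] else []) ++ pvRunsAux [] rest

lemma pvRunsAux_foldl (ps : List ((Int × Int) × Bool)) :
    ∀ (cur : List (Int × Int)) (out : List (List (Int × Int))),
      (if (ps.foldl (fun st pb =>
            if pb.2 then (st.1 ++ [pb.1], st.2)
            else ([], if st.1.length > 1 then st.2 ++ [st.1] else st.2))
            ((cur, out) : List (Int × Int) × List (List (Int × Int)))).1.length > 1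
        then (ps.foldl (fun st pb =>
            if pb.2 then (st.1 ++ [pb.1], st.2)
            else ([], if st.1.length > 1 then st.2 ++ [st.1] else st.2)) (cur, out)).2 ++
          [(ps.foldl (fun st pb =>
            if pb.2 then (st.1 ++ [pb.1], st.2)
            else ([], if st.1.length > 1 then st.2 ++ [st.1] else st.2)) (cur, out)).1]
        else (ps.foldl (fun st pb =>
            if pb.2 then (st.1 ++ [pb.1], st.2)
            else ([], if st.1.length > 1 then st.2 ++ [st.1] else st.2)) (cur, out)).2)
      = out ++ pvRunsAux cur ps := by
  induction ps with
  | nil =>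
    intro cur out
    simp only [List.foldl_nil, pvRunsAux]
    by_cases h : cur.length > 1 <;> simp [h]
  | cons pb rest ih =>
    intro cur out
    obtain ⟨pt, b⟩ := pb
    simp only [List.foldl_cons, pvRunsAux]
    cases b with
    | true => simpa using ih (cur ++ [pt]) out
    | false =>
      simp only [Bool.false_eq_true, if_false]
      by_cases h : cur.length > 1
      · simp only [h, if_true]
        rw [ih [] (out ++ [cur])]
        simp
      · simp only [h, if_false]
        rw [ih [] out]
        simp

lemma pvRunsAux_open (rest : List ((Int × Int) × Bool)) :
    ∀ cur : List (Int × Int),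
      pvRunsAux cur rest =
        (if (cur ++ (rest.takeWhile (fun q => q.2)).map (fun q => q.1)).length > 1
          then [cur ++ (rest.takeWhile (fun q => q.2)).map (fun q => q.1)] else []) ++
        pvRunsAux [] (rest.dropWhile (fun q => q.2)) := by
  induction rest with
  | nil => intro cur; simp [pvRunsAux]
  | cons pb r ih =>
    intro cur
    obtain ⟨pt, b⟩ := pb
    cases b with
    | true =>
      simp only [pvRunsAux, if_true, List.takeWhile_cons, List.dropWhile_cons]
      simpa [List.append_assoc] using ih (cur ++ [pt])
    | false =>
      simp [pvRunsAux]

lemma pvRuns_eq_aux (ps : List ((Int × Int) × Bool)) : pvRuns ps = pvRunsAux [] ps := by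
  induction ps using pvRuns.induct with
  | case1 => simp [pvRuns, pvRunsAux]
  | case2 pt rest run rest' hlen ih =>
    rw [pvRuns, pvRunsAux]
    simp only [reduceDIte, if_true, List.nil_append]
    rw [pvRunsAux_open rest [pt]]
    have hlen' : (pt :: List.map (fun q => q.1) (List.takeWhile (fun q => q.2) rest)).length > 1 := hlen
    have ih' : pvRuns (List.dropWhile (fun q => q.2) rest) = pvRunsAux [] (List.dropWhile (fun q => q.2) rest) := ih
    simp only [List.takeWhile_cons, List.dropWhile_cons, List.map_cons, List.singleton_append, reduceIte]
    rw [if_pos hlen', if_pos hlen', ih']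
    simp
  | case3 pt rest run rest' hlen ih =>
    rw [pvRuns, pvRunsAux]
    simp only [reduceDIte, if_true, List.nil_append]
    rw [pvRunsAux_open rest [pt]]
    have hlen' : ¬ (pt :: List.map (fun q => q.1) (List.takeWhile (fun q => q.2) rest)).length > 1 := hlen
    have ih' : pvRuns (List.dropWhile (fun q => q.2) rest) = pvRunsAux [] (List.dropWhile (fun q => q.2) rest) := ih
    simp only [List.takeWhile_cons, List.dropWhile_cons, List.map_cons, List.singleton_append, reduceIte]
    rw [if_neg hlen', if_neg hlen', ih']
    simp
  | case4 pt b rest hb ih =>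
    rw [pvRuns, pvRunsAux]
    simp only [hb]
    simpa using ih

lemma arrMk_getD (l : List Int) (k : Nat) (d : Int) : (Array.mk l).getD k d = l.getD k d := by
  by_cases h : k < l.length <;>
    simp [Array.getD, List.getD, h]

lemma pvYs_getD (paths : List (List (Int × Int))) (j kn : Nat) (h : kn < paths.length) :
    (pvYs paths j).getD kn 0 =
      if j < (paths.getD kn []).length then ((paths.getD kn []).getD j (0, 0)).2 else (2 : Int) ^ 62 := by
  unfold pvYs
  rw [List.getD, List.getElem?_map, List.getD]
  rw [List.getElem?_eq_getElem h]
  simp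

lemma len_mono (paths : List (List (Int × Int)))
    (hch : List.IsChain (fun p q => p.length ≤ q.length) paths) :
    ∀ a b : Nat, a ≤ b → b < paths.length →
      (paths.getD a []).length ≤ (paths.getD b []).length := by
  intro a b hab hb
  rw [List.isChain_iff_getElem] at hch
  induction b with
  | zero =>
    have : a = 0 := by omega
    subst this; exact le_rfl
  | succ b ih =>
    rcases Nat.eq_or_lt_of_le hab with rfl | hlt
    · exact le_rfl
    · have h1 : (paths.getD a []).length ≤ (paths.getD b []).length :=
        ih (by omega) (by omega)
      have h2 := hch b (by omega)
      have hb' : b < paths.length := by omega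
      have e1 : paths.getD b [] = paths[b] := by
        rw [List.getD, List.getElem?_eq_getElem hb']; rfl
      have e2 : paths.getD (b + 1) [] = paths[b + 1] := by
        rw [List.getD, List.getElem?_eq_getElem hb]; rfl
      rw [e2]
      rw [e1] at h1
      exact le_trans h1 h2

lemma ok_eq_keep (paths : List (List (Int × Int))) (la : Int)
    (hpre : la ≤ 0 ∨ List.IsChain (fun p q => p.length ≤ q.length) paths)
    (i j : Nat) (hi : i < paths.length) (hj : j < (paths.getD i []).length) :
    pvOkLoop ((paths.getD i []).getD j (0, 0)).2 paths (j : Int)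
        (PySem.List.pyRange ((i : Int) + 1) (min (la + (i : Int) + 1) (paths.length : Int)) 1)
      = decide ((min (la + (i : Int) + 1) (paths.length : Int)) ≤
          (((pvBuildNs paths.length (Array.mk (pvYs paths j))).getD i paths.length : Nat) : Int)) := by
  obtain ⟨ht1, ht2, ht3, ht4⟩ := pvBuildNs_spec paths.length (Array.mk (pvYs paths j)) i hi
  set n := paths.length with hn
  set e : Int := min (la + (i : Int) + 1) (n : Int) with he
  set t : Nat := (pvBuildNs n (Array.mk (pvYs paths j))).getD i n with htdef
  have hyv : ∀ kn : Nat, kn < n → j < (paths.getD kn []).length →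
      (Array.mk (pvYs paths j)).getD kn 0 = ((paths.getD kn []).getD j (0, 0)).2 := by
    intro kn h1 h2
    rw [arrMk_getD, pvYs_getD paths j kn h1, if_pos h2]
  have hen : e ≤ (n : Int) := min_le_right _ _
  rw [pvOkLoop_eq_all]
  by_cases hcase : e ≤ (i : Int) + 1
  · rw [PySem.List.pyRange_one_eq_nil hcase]
    simp only [List.all_nil]
    have : e ≤ (t : Nat) := by
      have : (i : Int) + 1 ≤ (t : Nat) := by exact_mod_cast ht1
      omega
    simp [this]
  · have hla : 0 < la := by omega
    have hch := hpre.resolve_left (by omega)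
    have hlen := len_mono paths hch
    by_cases hP : e ≤ ((t : Nat) : Int)
    · rw [decide_eq_true hP]
      rw [List.all_eq_true]
      intro k hk
      rw [PySem.List.mem_pyRange_one] at hk
      obtain ⟨hk1, hk2⟩ := hk
      have hk0 : 0 ≤ k := by omega
      set kn := k.toNat with hkn
      have hkc : (kn : Int) = k := Int.toNat_of_nonneg hk0
      have hknn : kn < n := by omega
      have hikn : i < kn := by omega
      have hjkn : j < (paths.getD kn []).length :=
        lt_of_lt_of_le hj (hlen i kn (by omega) hknn)
      have hknt : kn < t := by omega
      have hle := ht4 kn hikn hknt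
      rw [hyv i hi hj, hyv kn hknn hjkn] at hle
      rw [← hkc]
      simp only [PySem.List.pyGet?_natCast]
      exact decide_eq_true hle
    · rw [decide_eq_false hP]
      have htn : ((t : Nat) : Int) < e := by omega
      have htnn : t < n := by
        have : ((t : Nat) : Int) < (n : Int) := lt_of_lt_of_le htn hen
        exact_mod_cast this
      have hit : i + 1 ≤ t := ht1
      have hjt : j < (paths.getD t []).length :=
        lt_of_lt_of_le hj (hlen i t (by omega) htnn)
      have hlt := ht3 htnn
      rw [hyv i hi hj, hyv t htnn hjt] at hlt
      rw [List.all_eq_false]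
      refine ⟨(t : Int), ?_, ?_⟩
      · rw [PySem.List.mem_pyRange_one]
        constructor
        · exact_mod_cast hit
        · exact htn
      · simp only [PySem.List.pyGet?_natCast, Bool.not_eq_true, decide_eq_false_iff_not, not_le]
        exact hlt

lemma getD_map_range {β : Type} (m j : Nat) (f : Nat → β) (d : β) (h : j < m) :
    ((List.range m).map f).getD j d = f j := by
  rw [List.getD, List.getElem?_map, List.getElem?_range h]
  rfl

lemma zip_map_range {α β : Type} (dflt : α) : ∀ (row : List α) (g : Nat → β),
    row.zip ((List.range row.length).map g) =
      (List.range row.length).map (fun j => (row.getD j dflt, g j)) := by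
  intro row
  induction row with
  | nil => intro g; simp
  | cons x xs ih =>
    intro g
    simp only [List.length_cons, List.range_succ_eq_map, List.map_cons, List.zip_cons_cons,
      List.map_map]
    rw [show List.map (g ∘ Nat.succ) (List.range xs.length) =
        List.map (fun j => g (j + 1)) (List.range xs.length) from
      List.map_congr_left (fun a _ => rfl)]
    rw [ih (fun j => g (j + 1))]
    refine congrArg₂ List.cons rfl ?_
    exact List.map_congr_left (fun a _ => rfl)

lemma le_foldl_max (paths : List (List (Int × Int))) :
    ∀ p ∈ paths, p.length ≤ paths.foldl (fun a p => max a p.length) 0 := by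
  have hmono : ∀ (l : List (List (Int × Int))) (acc : Nat),
      acc ≤ l.foldl (fun a p => max a p.length) acc := by
    intro l
    induction l with
    | nil => intro acc; simp
    | cons x xs ih =>
      intro acc
      simp only [List.foldl_cons]
      exact le_trans (Nat.le_max_left _ _) (ih _)
  have hgen : ∀ (l : List (List (Int × Int))) (acc : Nat), ∀ p ∈ l,
      p.length ≤ l.foldl (fun a p => max a p.length) acc := by
    intro l
    induction l with
    | nil => intro acc p hp; simp at hp
    | cons x xs ih =>
      intro acc p hp
      rcases List.mem_cons.mp hp with rfl | hp
      · simp only [List.foldl_cons]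
        exact le_trans (Nat.le_max_right _ _) (hmono _ _)
      · exact ih _ p hp
  exact hgen paths 0

lemma flushA (len : Nat) (pt : Int → (Int × Int)) (kp : Int → Bool)
    (out : List (List (Int × Int))) :
    (if ((PySem.List.pyRange 0 (len : Int) 1).foldl
          (fun (st : List (Int × Int) × List (List (Int × Int))) j =>
            if kp j then (st.1 ++ [pt j], st.2)
            else ([], if st.1.length > 1 then st.2 ++ [st.1] else st.2)) ([], out)).1.length > 1
      then ((PySem.List.pyRange 0 (len : Int) 1).foldl
          (fun (st : List (Int × Int) × List (List (Int × Int))) j =>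
            if kp j then (st.1 ++ [pt j], st.2)
            else ([], if st.1.length > 1 then st.2 ++ [st.1] else st.2)) ([], out)).2 ++
        [((PySem.List.pyRange 0 (len : Int) 1).foldl
          (fun (st : List (Int × Int) × List (List (Int × Int))) j =>
            if kp j then (st.1 ++ [pt j], st.2)
            else ([], if st.1.length > 1 then st.2 ++ [st.1] else st.2)) ([], out)).1]
      else ((PySem.List.pyRange 0 (len : Int) 1).foldl
          (fun (st : List (Int × Int) × List (List (Int × Int))) j =>
            if kp j then (st.1 ++ [pt j], st.2)
            else ([], if st.1.length > 1 then st.2 ++ [st.1] else st.2)) ([], out)).2)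
    = out ++ pvRunsAux [] ((List.range len).map (fun (jn : Nat) => (pt (jn : Int), kp (jn : Int)))) := by
  rw [PySem.List.pyRange_zero_natCast, List.foldl_map]
  have h2 : (List.range len).foldl
      (fun (st : List (Int × Int) × List (List (Int × Int))) (jn : Nat) =>
        if kp (jn : Int) then (st.1 ++ [pt (jn : Int)], st.2)
        else ([], if st.1.length > 1 then st.2 ++ [st.1] else st.2)) ([], out)
    = ((List.range len).map (fun (jn : Nat) => (pt (jn : Int), kp (jn : Int)))).foldl
      (fun (st : List (Int × Int) × List (List (Int × Int))) pb =>
        if pb.2 then (st.1 ++ [pb.1], st.2)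
        else ([], if st.1.length > 1 then st.2 ++ [st.1] else st.2)) ([], out) := by
    rw [List.foldl_map]
  rw [h2]
  exact pvRunsAux_foldl _ [] out

set_option maxHeartbeats 2000000 in
theorem occlude_spec : Claim_equal_occlude := by
  intro paths lookahead _ hpre
  obtain ⟨hne, hdisj⟩ := hpre
  have hn1 : 1 ≤ paths.length := List.length_pos_iff.mpr hne
  unfold Spec_occlude occlude occlude_alt
  simp only []
  have hcast : ((paths.length : Int) - 1) = ((paths.length - 1 : Nat) : Int) := by omega
  rw [hcast, PySem.List.pyRange_zero_natCast, List.foldl_map]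
  congr 1
  · apply PySem.List.foldl_congr_mem
    intro out i hi
    beta_reduce
    have hfa := flushA ((PySem.List.pyGet? paths (i : Int)).getD []).length
      (fun j => (PySem.List.pyGet? ((PySem.List.pyGet? paths (i : Int)).getD []) j).getD (0, 0))
      (fun j => pvOkLoop ((PySem.List.pyGet? ((PySem.List.pyGet? paths (i : Int)).getD []) j).getD (0, 0)).2 paths j
        (PySem.List.pyRange ((i : Int) + 1)
          (min (pvLa lookahead paths.length + (i : Int) + 1)
            (paths.length : Int)) 1))
      out
    beta_reduce at hfa
    rw [hfa]
    rw [zip_map_range ((0, 0) : Int × Int), pvRuns_eq_aux]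
    refine congrArg (fun L => out ++ pvRunsAux [] L) ?_
    beta_reduce
    have hrow : (PySem.List.pyGet? paths (i : Int)).getD [] = paths.getD i [] := by
      simp only [PySem.List.pyGet?_natCast]; rfl
    rw [hrow]
    apply List.map_congr_left
    intro jn hjn
    have hi' : i < paths.length - 1 := List.mem_range.mp hi
    have hi2 : i < paths.length := by omega
    have hjn' : jn < (paths.getD i []).length := List.mem_range.mp hjn
    have h1 : (PySem.List.pyGet? (paths.getD i []) (jn : Int)).getD (0, 0)
        = (paths.getD i []).getD jn (0, 0) := by
      simp only [PySem.List.pyGet?_natCast]; rfl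
    rw [h1]
    refine congrArg (Prod.mk _) ?_
    rw [ok_eq_keep paths (pvLa lookahead paths.length) hdisj i jn hi2 hjn']
    have hm : jn < List.foldl (fun a p => max a p.length) 0 paths := by
      have hmem : paths.getD i [] ∈ paths := by
        have hg : paths.getD i [] = paths[i] := by
          rw [List.getD, List.getElem?_eq_getElem hi2]; rfl
        rw [hg]
        exact List.getElem_mem hi2
      exact lt_of_lt_of_le hjn' (le_foldl_max paths _ hmem)
    rw [getD_map_range _ jn _ #[] hm]
  · rw [PySem.List.pyGet?_neg_one, List.getLast?_eq_getElem?]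
    rfl
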